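-- pv_equiv track=rewrite | github.com/Vergil0327/leetcode-history | Bit Manipulation/3806. Maximum Bitwise AND After Increment Operations/solution.py | maximumAND
-- ===== SOURCE A (Python) =====
-- from typing import List
--
-- def maximumAND(nums: List[int], k: int, m: int) -> int:
--     res = 0
--
--     # Iterate from the 30th bit down to 0
--     for b in range(30, -1, -1):
--         target = res | (1 << b)
--
--         costs = []
--         for x in nums:
--             # We need to find the smallest Y >= x such that (Y & target) == target
--             # This is a bitwise trick:
--             # 1. Start with the bits of x that are already at or above target
--             # 2. Or, use a simpler greedy approach for the cost:
--
--             cost = 0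
--             current_val = x
--             # If current_val already has target bits, cost is 0.
--             # If not, we must increase it.
--             if (current_val & target) != target:
--                 # To satisfy 'target', the simplest way is to see what x
--                 # looks like if we force the target bits.
--                 # Specifically: (x >> b) must be increased if the bits don't match.
--
--                 # Correct cost calculation for 'at least x' with 'target bits':
--                 # We only care about bits from b upwards for the current greedy step.
--                 # cost = (target - (x % (some power))) ...
--                 # Let's use the precise logic:
--
--                 # The smallest Y >= x such that (Y & target) == target:
--                 # We only need to check bits from 30 down to 0.
--                 # val = 0
--                 # for i in range(30, -1, -1):
--                 #     if (target >> i) & 1: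
--                 #         val |= (1 << i)
--                 #     else:
--                 #         # If this bit is not in target, we want to keep
--                 #         # the bit from x IF it doesn't prevent us from
--                 #         # hitting a higher target bit.
--                 #         # But actually, there's a simpler way:
--                 #         pass
--
--                 # Let's use the actual required math:
--                 # Smallest Y >= x s.t. (Y & target) == target
--                 Y = 0
--                 for i in range(30, -1, -1):
--                     if (target >> i) & 1:
--                         Y |= (1 << i)
--                     elif (Y | ((1 << i) - 1)) < x:
--                         # If we don't set this bit, even if all lower bits
--                         # are 1, we are still < x. So we MUST set it.
--                         Y |= (1 << i)
--                 cost = Y - x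
--
--             costs.append(cost)
--
--         costs.sort()
--         # Check if the sum of the m cheapest costs is within k
--         if sum(costs[:m]) <= k:
--             res = target
--
--     return res
-- ===== SOURCE B (Python) =====
-- from typing import List
--
-- def _cost(x: int, t: int) -> int:
--     # cheapest number of +1 increments making all bits of t set in x
--     if (x & t) == t:
--         return 0
--     y = 0
--     for i in range(30, -1, -1):
--         if (t >> i) & 1:
--             y |= 1 << i
--         elif (y | ((1 << i) - 1)) < x:
--             y |= 1 << i
--     return y - x
--
-- def _sum_smallest(xs: List[int], c: int) -> int:
--     # sum of the c smallest values of xs, by three-way-partition quickselect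
--     if c <= 0:
--         return 0
--     if c >= len(xs):
--         return sum(xs)
--     p = xs[len(xs) // 2]
--     lt = [v for v in xs if v < p]
--     if c <= len(lt):
--         return _sum_smallest(lt, c)
--     eq = [v for v in xs if v == p]
--     if c <= len(lt) + len(eq):
--         return sum(lt) + p * (c - len(lt))
--     gt = [v for v in xs if v > p]
--     return sum(lt) + p * len(eq) + _sum_smallest(gt, c - len(lt) - len(eq))
--
-- def maximumAND(nums: List[int], k: int, m: int) -> int:
--     res = 0
--     for b in range(30, -1, -1):
--         target = res | (1 << b)
--         costs = [_cost(x, target) for x in nums]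
--         if _sum_smallest(costs, m) <= k:
--             res = target
--     return res
-- ===== Notes on version B (the rewrite author's own statement) =====
-- stated objective: alternative
-- what changed: The per-bit selection of the m cheapest costs is done by a three-way-partition quickselect (recursive sum-of-c-smallest) instead of fully sorting the cost list and summing a slice; Pre_ restricts m to nonnegative values, the natural domain of a count parameter (for negative m A's costs[:m] slice sums all but the last |m| costs, a behaviour no caller would specify, and B's quickselect treats m<=0 as an empty selection).
-- outside the precondition, e.g. on maximumAND([1, 2], 10, -1): A returns 12, B returns 2147483647
import Mathlib
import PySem

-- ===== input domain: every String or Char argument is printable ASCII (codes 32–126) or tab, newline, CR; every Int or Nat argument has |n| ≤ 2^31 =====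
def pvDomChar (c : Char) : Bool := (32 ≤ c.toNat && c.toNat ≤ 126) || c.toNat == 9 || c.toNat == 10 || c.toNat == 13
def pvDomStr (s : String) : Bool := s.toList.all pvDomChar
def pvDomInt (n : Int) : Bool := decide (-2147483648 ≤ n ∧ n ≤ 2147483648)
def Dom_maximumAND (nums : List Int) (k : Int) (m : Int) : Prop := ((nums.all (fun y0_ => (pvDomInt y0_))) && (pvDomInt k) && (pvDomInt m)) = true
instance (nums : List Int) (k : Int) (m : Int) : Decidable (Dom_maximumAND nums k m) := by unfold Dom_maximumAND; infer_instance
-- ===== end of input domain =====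

-- B replaces A's per-bit sort-then-slice-sum of the cost list by a three-way-partition
-- quickselect computing the sum of the m cheapest costs directly (objective: alternative).

-- ===== PORT A =====
-- literal port of A: per bit b from 30 down to 0, build the cost list by an append loop,
-- sort it, and sum the slice costs[:m].  (1 << b) is ported as (1 : Int) <<< b.toNat — b
-- comes from range(30,-1,-1), so 0 ≤ b and .toNat is exact.
def maximumAND (nums : List Int) (k : Int) (m : Int) : Int :=
  (PySem.List.pyRange 30 (-1) (-1)).foldl (fun res b =>
    let target := PySem.Int.bor res ((1 : Int) <<< b.toNat)
    let costs := nums.foldl (fun costs x =>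
      let cost : Int :=
        if PySem.Int.band x target ≠ target then
          -- Y-building inner loop, for i in range(30,-1,-1)
          let Y := (PySem.List.pyRange 30 (-1) (-1)).foldl (fun Y i =>
            if PySem.Int.band (target >>> i.toNat) 1 ≠ 0 then
              PySem.Int.bor Y ((1 : Int) <<< i.toNat)
            else if PySem.Int.bor Y (((1 : Int) <<< i.toNat) - 1) < x then
              PySem.Int.bor Y ((1 : Int) <<< i.toNat)
            else Y) 0
          Y - x
        else 0
      costs ++ [cost]) []
    let sortedCosts := PySem.List.sorted costs (fun v => v) false
    if (PySem.List.slice sortedCosts none (some m)).sum ≤ k then target else res) 0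

-- ===== PORT B =====
-- helper _cost of Source B (early return when the target bits are already set)
def pvCostB (x : Int) (t : Int) : Int :=
  if PySem.Int.band x t = t then 0
  else
    let y := (PySem.List.pyRange 30 (-1) (-1)).foldl (fun y i =>
      if PySem.Int.band (t >>> i.toNat) 1 ≠ 0 then
        PySem.Int.bor y ((1 : Int) <<< i.toNat)
      else if PySem.Int.bor y (((1 : Int) <<< i.toNat) - 1) < x then
        PySem.Int.bor y ((1 : Int) <<< i.toNat)
      else y) 0
    y - x

-- helper _sum_smallest of Source B: quickselect sum of the c smallest elements.
-- xs[len(xs)//2] is ported as getD: in the branch reached, 1 ≤ c < len xs, so the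
-- index len(xs)/2 is in range and getD is exact.
def pvSumSmallest (xs : List Int) (c : Int) : Int :=
  if c ≤ 0 then 0
  else if (xs.length : Int) ≤ c then xs.sum
  else
    let p := xs.getD (xs.length / 2) 0
    let lt := xs.filter (fun v => v < p)
    if c ≤ (lt.length : Int) then pvSumSmallest lt c
    else
      let eq := xs.filter (fun v => v = p)
      if c ≤ (lt.length : Int) + (eq.length : Int) then
        lt.sum + p * (c - (lt.length : Int))
      else
        let gt := xs.filter (fun v => p < v)
        lt.sum + p * (eq.length : Int) +
          pvSumSmallest gt (c - (lt.length : Int) - (eq.length : Int))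
termination_by xs.length
decreasing_by
  all_goals
  · have hlen : xs.length / 2 < xs.length := by omega
    have hmem : xs.getD (xs.length / 2) 0 ∈ xs := by
      rw [List.getD_eq_getElem xs 0 hlen]; exact List.getElem_mem hlen
    simp only [List.length_unattach]
    calc _ < xs.attach.length := List.length_filter_lt_length_iff_exists.2
              ⟨⟨_, hmem⟩, List.mem_attach _ _, by simp⟩
      _ = xs.length := List.length_attach

-- literal port of Source B's maximumAND: the same bit loop with costs built by a
-- comprehension (map) and the m cheapest selected by quickselect.
def maximumAND_alt (nums : List Int) (k : Int) (m : Int) : Int :=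
  (PySem.List.pyRange 30 (-1) (-1)).foldl (fun res b =>
    let target := PySem.Int.bor res ((1 : Int) <<< b.toNat)
    let costs := nums.map (fun x => pvCostB x target)
    if pvSumSmallest costs m ≤ k then target else res) 0

-- ===== PRECONDITION & SPEC =====
-- Pre_ excludes negative m, outside the natural domain of a count parameter: there A's
-- slice costs[:m] sums all but the last |m| costs, a behaviour no caller would specify,
-- while B's quickselect treats m <= 0 as an empty selection.
def Pre_maximumAND (nums : List Int) (k : Int) (m : Int) : Prop := 0 ≤ m
instance (nums : List Int) (k : Int) (m : Int) : Decidable (Pre_maximumAND nums k m) := by unfold Pre_maximumAND; infer_instance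
def pvWitness_maximumAND : List Int × Int × Int := ([3, 5], 2, 1)

def Spec_maximumAND (nums : List Int) (k : Int) (m : Int) (out : Int) : Prop := out = maximumAND_alt nums k m
instance (nums : List Int) (k : Int) (m : Int) (out : Int) : Decidable (Spec_maximumAND nums k m out) := by unfold Spec_maximumAND; infer_instance

-- ===== CLAIM (what is proved, stated in full; the proofs are below) =====
def Claim_equal_maximumAND : Prop := ∀ (nums : List Int) (k : Int) (m : Int), Dom_maximumAND nums k m → Pre_maximumAND nums k m → Spec_maximumAND nums k m (maximumAND nums k m)

-- ===== LEMMAS AND PROOFS =====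

lemma pv_perm3 (xs : List Int) (p : Int) :
    (xs.filter (fun v => v < p) ++ xs.filter (fun v => v = p) ++ xs.filter (fun v => p < v)).Perm xs := by
  induction xs with
  | nil => simp
  | cons x t ih =>
    rcases lt_trichotomy x p with h | h | h
    · simpa [List.filter_cons, h, not_lt.2 h.le, h.ne] using ih.cons x
    · subst h
      simp only [List.filter_cons, lt_self_iff_false, decide_false, Bool.false_eq_true,
        if_neg, not_false_iff, decide_true, if_pos]
      refine List.Perm.trans ?_ ((List.perm_middle).trans (ih.cons x))
      simp only [List.append_assoc, List.cons_append]
      exact List.Perm.append_left _ List.perm_middle.symm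
    · simp only [List.filter_cons, not_lt.2 h.le, h.ne', decide_false,
        Bool.false_eq_true, if_neg, not_false_iff, h, decide_true, if_pos]
      refine List.Perm.trans ?_ ((List.perm_middle).trans (ih.cons x))
      simp

lemma pv_sum_const (l : List Int) (p : Int) (h : ∀ a ∈ l, a = p) :
    l.sum = p * (l.length : Int) := by
  induction l with
  | nil => simp
  | cons a t ih =>
    have ha := h a (by simp)
    have := ih (fun b hb => h b (by simp [hb]))
    simp [ha, this]; ring

lemma pv_sorted_split (xs : List Int) (p : Int) :
    PySem.List.sorted xs (fun v => v) false =
      PySem.List.sorted (xs.filter (fun v => v < p)) (fun v => v) false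
        ++ xs.filter (fun v => v = p)
        ++ PySem.List.sorted (xs.filter (fun v => p < v)) (fun v => v) false := by
  apply PySem.List.sorted_id_eq_of_perm_of_pairwise
  · refine List.Perm.trans ?_ (pv_perm3 xs p)
    exact ((PySem.List.sorted_perm _ _ _).append (List.Perm.refl _)).append
      (PySem.List.sorted_perm _ _ _)
  · rw [List.pairwise_append, List.pairwise_append]
    have hL : ∀ a ∈ PySem.List.sorted (xs.filter (fun v => v < p)) (fun v => v) false, a < p := by
      intro a ha; rw [PySem.List.mem_sorted, List.mem_filter] at ha
      simpa using ha.2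
    have hE : ∀ a ∈ xs.filter (fun v => v = p), a = p := by
      intro a ha; rw [List.mem_filter] at ha; simpa using ha.2
    have hG : ∀ a ∈ PySem.List.sorted (xs.filter (fun v => p < v)) (fun v => v) false, p < a := by
      intro a ha; rw [PySem.List.mem_sorted, List.mem_filter] at ha
      simpa using ha.2
    refine ⟨⟨by simpa using PySem.List.sorted_pairwise _ (fun v : Int => v), ?_, ?_⟩,
      by simpa using PySem.List.sorted_pairwise _ (fun v : Int => v), ?_⟩
    · exact List.pairwise_of_forall_mem_list (fun a ha b hb => by
        rw [hE a ha, hE b hb])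
    · intro a ha b hb
      have := hL a ha; have := hE b hb; omega
    · intro a ha b hb
      have hb' := hG b hb
      rcases List.mem_append.1 ha with ha | ha
      · have := hL a ha; omega
      · have := hE a ha; omega

lemma pv_qs_eq_sorted (xs : List Int) (c : Int) :
    pvSumSmallest xs c = ((PySem.List.sorted xs (fun v => v) false).take c.toNat).sum := by
  fun_induction pvSumSmallest xs c with
  | case1 xs c h =>
    rw [Int.toNat_of_nonpos h]; simp
  | case2 xs c h1 h2 =>
    rw [List.take_of_length_le (by
      rw [PySem.List.length_sorted]; omega), ((PySem.List.sorted_perm _ _ _).sum_eq)]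
  | case3 xs c hc0 hlen p lt hlt ih =>
    simp only [p, lt, List.unattach_filter, List.unattach_attach] at hlt ih
    dsimp only
    rw [if_pos hlt, ih, pv_sorted_split xs (xs.getD (xs.length / 2) 0)]
    rw [List.append_assoc, List.take_append_of_le_length (by
      rw [PySem.List.length_sorted]; omega)]
  | case4 xs c hc0 hlen p lt hlt eq hle =>
    simp only [p, lt, eq, List.unattach_filter, List.unattach_attach] at hlt hle
    dsimp only
    simp only [p]
    rw [if_neg hlt, if_pos hle, pv_sorted_split xs (xs.getD (xs.length / 2) 0)]
    rw [List.take_append, List.take_append,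
      List.take_of_length_le
        (l := PySem.List.sorted (xs.filter (fun v => v < xs.getD (xs.length / 2) 0)) (fun v => v) false)
        (by rw [PySem.List.length_sorted]; omega),
      List.sum_append, List.sum_append,
      (PySem.List.sorted_perm _ _ _).sum_eq]
    rw [show c.toNat -
        ((PySem.List.sorted (xs.filter (fun v => v < xs.getD (xs.length / 2) 0)) (fun v => v) false) ++
          xs.filter (fun v => v = xs.getD (xs.length / 2) 0)).length = 0 from by
        rw [List.length_append, PySem.List.length_sorted]; omega,
      List.take_zero]
    rw [pv_sum_const
      (List.take
        (c.toNat -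
          (PySem.List.sorted (xs.filter (fun v => v < xs.getD (xs.length / 2) 0)) (fun v => v) false).length)
        (xs.filter (fun v => v = xs.getD (xs.length / 2) 0)))
      (xs.getD (xs.length / 2) 0)
      (fun a ha => by
        have := List.take_subset _ _ ha
        rw [List.mem_filter] at this; simpa using this.2),
      List.length_take, PySem.List.length_sorted]
    rw [List.sum_nil, add_zero]
    congr 1
    rw [mul_comm, mul_comm (xs.getD (xs.length / 2) 0)]
    congr 1
    omega
  | case5 xs c hc0 hlen p lt hlt eq hle gt ih =>
    simp only [p, lt, eq, gt, List.unattach_filter, List.unattach_attach] at hlt hle ih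
    dsimp only
    simp only [p]
    rw [if_neg hlt, if_neg hle, pv_sorted_split xs (xs.getD (xs.length / 2) 0)]
    rw [List.take_append, List.take_append,
      List.take_of_length_le
        (l := PySem.List.sorted (xs.filter (fun v => v < xs.getD (xs.length / 2) 0)) (fun v => v) false)
        (by rw [PySem.List.length_sorted]; omega),
      List.take_of_length_le
        (l := xs.filter (fun v => v = xs.getD (xs.length / 2) 0))
        (by rw [PySem.List.length_sorted]; omega),
      List.sum_append, List.sum_append,
      (PySem.List.sorted_perm _ _ _).sum_eq,
      pv_sum_const (xs.filter (fun v => v = xs.getD (xs.length / 2) 0)) _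
        (fun a ha => by rw [List.mem_filter] at ha; simpa using ha.2)]
    rw [show c.toNat -
        ((PySem.List.sorted (xs.filter (fun v => v < xs.getD (xs.length / 2) 0)) (fun v => v) false) ++
          xs.filter (fun v => v = xs.getD (xs.length / 2) 0)).length =
        (c - ↑(xs.filter (fun v => v < xs.getD (xs.length / 2) 0)).length -
          ↑(xs.filter (fun v => v = xs.getD (xs.length / 2) 0)).length).toNat from by
        rw [List.length_append, PySem.List.length_sorted]; omega,
      ← ih]
    simp only [List.getD_eq_getElem?_getD]

-- for 0 ≤ m, the sum of the slice sorted(ys)[:m] is the quickselect sum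
lemma pv_slice_eq_qs (ys : List Int) (m : Int) (hm : 0 ≤ m) :
    (PySem.List.slice (PySem.List.sorted ys (fun v => v) false) none (some m)).sum =
      pvSumSmallest ys m := by
  rw [pv_qs_eq_sorted, PySem.List.slice_to _ hm]

-- A's inline cost expression equals B's helper pvCostB
lemma pv_cost_eq (x t : Int) :
    (if PySem.Int.band x t ≠ t then
      ((PySem.List.pyRange 30 (-1) (-1)).foldl (fun Y i =>
        if PySem.Int.band (t >>> i.toNat) 1 ≠ 0 then PySem.Int.bor Y ((1 : Int) <<< i.toNat)
        else if PySem.Int.bor Y (((1 : Int) <<< i.toNat) - 1) < x then PySem.Int.bor Y ((1 : Int) <<< i.toNat)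
        else Y) 0) - x
    else 0) = pvCostB x t := by
  by_cases h : PySem.Int.band x t = t <;> simp [pvCostB, h]

-- ===== VERDICT (by name: the statement is the Claim_ definition above) =====
theorem maximumAND_spec : Claim_equal_maximumAND := by
  intro nums k m _ hm
  unfold Spec_maximumAND maximumAND maximumAND_alt
  dsimp only
  apply PySem.List.foldl_congr_mem
  intro res b hb
  dsimp only
  rw [PySem.List.foldl_append_singleton_eq_map]
  simp only [List.nil_append, pv_cost_eq]
  rw [pv_slice_eq_qs _ _ hm]
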